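-- pv_equiv track=rewrite | github.com/MarchandAlain/Whand | whand_io_online.py | no_line_feed
-- ===== SOURCE A (Python) =====
-- def no_line_feed(values):                                      # required by Whand
--     """
--     look for line feeds (10) in int list
--     remove them and return new list
--     if not preceded by CR (13), replace with CR
--     called by readscriptfile
--     Parameters
--     -----------
--         values: a list of int representing character codes
--     Return
--     -------
--         li: a list of int representing character codes
--     """
--     li=[]
--     preced=None
--     for byte in values:
--         if preced!=13 and byte==10: li+=[13]
--         elif byte!=10: li+=[byte]
--         preced=byte
--     return li
-- ===== SOURCE B (Python) =====
-- def no_line_feed(values):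
--     # Pass 1: drop each LF (10) that immediately follows a CR (13).
--     kept = []
--     prev = None
--     for byte in values:
--         if not (byte == 10 and prev == 13):
--             kept.append(byte)
--         prev = byte
--     # Pass 2: turn every remaining LF into a CR.
--     return [13 if b == 10 else b for b in kept]
-- ===== Notes on version B (the rewrite author's own statement) =====
-- stated objective: alternative
-- what changed: Single fold with combined branching is replaced by two separate passes: first drop LFs that follow a CR, then map remaining LFs to CR with a comprehension.
import Mathlib
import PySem

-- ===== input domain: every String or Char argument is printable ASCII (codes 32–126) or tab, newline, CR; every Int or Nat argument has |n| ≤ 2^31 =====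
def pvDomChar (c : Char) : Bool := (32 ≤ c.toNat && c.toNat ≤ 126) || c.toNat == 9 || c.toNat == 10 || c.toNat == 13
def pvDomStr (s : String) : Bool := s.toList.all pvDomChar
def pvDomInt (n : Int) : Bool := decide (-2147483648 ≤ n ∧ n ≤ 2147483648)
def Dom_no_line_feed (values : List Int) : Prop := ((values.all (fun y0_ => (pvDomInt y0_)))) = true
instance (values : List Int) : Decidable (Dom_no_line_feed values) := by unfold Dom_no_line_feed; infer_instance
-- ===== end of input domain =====

-- B: two separate passes (drop LF-after-CR, then map LF→CR) instead of A's single fold with combined branching; alternative decomposition, same cost.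

-- ===== PORT A =====
-- single loop; state = (li, preced), preced starts as None
def no_line_feed (values : List Int) : List Int :=
  (values.foldl
    (fun (s : List Int × Option Int) byte =>
      ( if s.2 ≠ some 13 ∧ byte = 10 then s.1 ++ [13]
        else if byte ≠ 10 then s.1 ++ [byte]
        else s.1,
        some byte))
    ([], none)).1

-- ===== PORT B =====
-- pass 1: drop each LF (10) immediately following a CR (13)
def nlfDropAfterCR (prev : Option Int) : List Int → List Int
  | [] => []
  | b :: rest =>
    if b = 10 ∧ prev = some 13 then nlfDropAfterCR (some b) rest
    else b :: nlfDropAfterCR (some b) rest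

-- pass 2: comprehension mapping remaining LFs to CR
def no_line_feed_alt (values : List Int) : List Int :=
  (nlfDropAfterCR none values).map (fun b => if b = 10 then 13 else b)

-- ===== PRECONDITION & SPEC =====
def Spec_no_line_feed (values : List Int) (out : List Int) : Prop := out = no_line_feed_alt values
instance (values : List Int) (out : List Int) : Decidable (Spec_no_line_feed values out) := by unfold Spec_no_line_feed; infer_instance

-- ===== CLAIM (what is proved, stated in full; the proofs are below) =====
def Claim_equal_no_line_feed : Prop := ∀ (values : List Int), Dom_no_line_feed values → Spec_no_line_feed values (no_line_feed values)

-- ===== LEMMAS AND PROOFS =====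
theorem nlf_fold_eq (values : List Int) (acc : List Int) (prev : Option Int) :
    (values.foldl
      (fun (s : List Int × Option Int) byte =>
        ( if s.2 ≠ some 13 ∧ byte = 10 then s.1 ++ [13]
          else if byte ≠ 10 then s.1 ++ [byte]
          else s.1,
          some byte))
      (acc, prev)).1
    = acc ++ (nlfDropAfterCR prev values).map (fun b => if b = 10 then 13 else b) := by
  induction values generalizing acc prev with
  | nil => simp [nlfDropAfterCR]
  | cons b rest ih =>
    simp only [List.foldl, nlfDropAfterCR]
    rw [ih]
    by_cases h10 : b = 10
    · by_cases h13 : prev = some 13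
      · simp [h10, h13]
      · simp [h10, h13]
    · simp [h10]

-- ===== VERDICT (by name: the statement is the Claim_ definition above) =====
theorem no_line_feed_spec : Claim_equal_no_line_feed := by
  intro values _
  unfold Spec_no_line_feed no_line_feed no_line_feed_alt
  simpa using nlf_fold_eq values [] none
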